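-- pv_equiv track=rewrite | github.com/akashdeep3194/Scaler | d27/Maximum Difference.py | solve
-- ===== SOURCE A (Python) =====
-- def solve(A, B):
--     A.sort()
--     xs = ns = 0
--     ts = 0
--     for i in range(B):
--         xs += A[i]
--     for j in range(len(A)):
--         ts += A[j]
--     for k in range(len(A)-1,len(A)-B-1,-1):
--         ns += A[k]
--     return max(abs(2*ns-ts),abs(2*xs-ts))
-- ===== SOURCE B (Python) =====
-- def _sum_smallest(xs, k):
--     # sum of the k smallest elements of xs via quickselect-style partitioning
--     if k <= 0 or not xs:
--         return 0
--     if k >= len(xs):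
--         return sum(xs)
--     p = xs[len(xs) // 2]
--     less = [x for x in xs if x < p]
--     if k <= len(less):
--         return _sum_smallest(less, k)
--     eq = xs.count(p)
--     if k <= len(less) + eq:
--         return sum(less) + (k - len(less)) * p
--     greater = [x for x in xs if x > p]
--     return sum(less) + eq * p + _sum_smallest(greater, k - len(less) - eq)
--
--
-- def solve(A, B):
--     n = len(A)
--     ts = sum(A)
--     xs = _sum_smallest(A, B)
--     ns = ts - _sum_smallest(A, n - B)
--     return max(abs(2 * ns - ts), abs(2 * xs - ts))
-- ===== Notes on version B (the rewrite author's own statement) =====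
-- stated objective: alternative
-- what changed: Replaces sort-then-three-index-loops with a quickselect-style partition recursion that sums the B smallest elements in expected O(n) without sorting (B largest obtained as total minus the (n-B) smallest); note A sorts its argument in place, B does not mutate it.
import Mathlib
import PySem

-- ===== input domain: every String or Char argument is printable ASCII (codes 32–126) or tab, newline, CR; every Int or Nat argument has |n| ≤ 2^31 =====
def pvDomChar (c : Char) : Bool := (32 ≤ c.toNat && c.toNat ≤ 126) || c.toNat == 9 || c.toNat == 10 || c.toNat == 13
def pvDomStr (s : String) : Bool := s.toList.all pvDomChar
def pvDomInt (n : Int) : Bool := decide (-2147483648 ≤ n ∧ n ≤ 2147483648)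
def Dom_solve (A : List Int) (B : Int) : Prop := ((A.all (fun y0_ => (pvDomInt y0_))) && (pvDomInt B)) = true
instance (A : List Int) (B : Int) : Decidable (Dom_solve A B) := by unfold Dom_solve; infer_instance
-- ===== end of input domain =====

-- B replaces sort + three index loops by a quickselect-style partition recursion (alternative
-- algorithm, similar measured cost); equivalence is about the RETURN value only — A sorts its
-- argument in place, B does not mutate it.


-- ===== PORT A =====
def solve (A : List Int) (B : Int) : Int :=
  let s := PySem.List.sorted A (fun x => x) false
  let xs := (PySem.List.pyRange 0 B 1).foldl (fun acc i => acc + PySem.List.pyGetD s i 0) 0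
  let ts := (PySem.List.pyRange 0 (s.length : Int) 1).foldl
      (fun acc j => acc + PySem.List.pyGetD s j 0) 0
  let ns := (PySem.List.pyRange ((s.length : Int) - 1) ((s.length : Int) - B - 1) (-1)).foldl
      (fun acc k => acc + PySem.List.pyGetD s k 0) 0
  max |2 * ns - ts| |2 * xs - ts|

-- ===== PORT B =====
-- termination helpers for the partition recursion (cited by name in decreasing_by)
theorem pvFilterLt {xs : List Int} (q : Int → Bool) (p : Int) (hp : p ∈ xs) (hq : q p = false) :
    (xs.filter q).length < xs.length := by
  have h1 : (xs.filter q).length ≤ xs.length := List.length_filter_le _ _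
  rcases Nat.lt_or_ge (xs.filter q).length xs.length with h | h
  · exact h
  · exact absurd (List.length_filter_eq_length_iff.mp (le_antisymm h1 h) p hp) (by simp [hq])

theorem pvCountLt (xs : List Int) (v : Int) :
    List.countP (fun x : {y // y ∈ xs} => decide ((x : Int) < v)) xs.attach
      = List.countP (fun x => decide (x < v)) xs :=
  List.countP_attach (p := fun y => decide (y < v))

theorem pvCountGt (xs : List Int) (v : Int) :
    List.countP (fun x : {y // y ∈ xs} => decide (v < (x : Int))) xs.attach
      = List.countP (fun x => decide (v < x)) xs :=
  List.countP_attach (p := fun y => decide (v < y))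

-- quickselect-style partition recursion: sum of the k smallest elements of xs
def sumSmallest (xs : List Int) (k : Int) : Int :=
  if k ≤ 0 ∨ xs = [] then 0
  else if (xs.length : Int) ≤ k then xs.sum
  else
    let p := xs.getD (xs.length / 2) 0
    let less := xs.filter (fun x => x < p)
    if k ≤ (less.length : Int) then sumSmallest less k
    else
      let eq : Int := xs.count p
      if k ≤ (less.length : Int) + eq then less.sum + (k - less.length) * p
      else
        let gtr := xs.filter (fun x => p < x)
        less.sum + eq * p + sumSmallest gtr (k - less.length - eq)
termination_by xs.length
decreasing_by
  all_goals
    simp_wf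
    have hlen : xs.length ≠ 0 := fun h0 => (by tauto : xs ≠ []) (List.length_eq_zero_iff.mp h0)
    have hlt : xs.length / 2 < xs.length := Nat.div_lt_self (Nat.pos_of_ne_zero hlen) (by omega)
    have hp : xs[xs.length / 2]?.getD 0 ∈ xs := by
      rw [List.getElem?_eq_getElem hlt]; exact List.getElem_mem hlt
    have hfl := pvFilterLt (xs := xs) (fun x => decide (x < xs[xs.length / 2]?.getD 0))
      (xs[xs.length / 2]?.getD 0) hp (by simp)
    have hfg := pvFilterLt (xs := xs) (fun x => decide (xs[xs.length / 2]?.getD 0 < x))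
      (xs[xs.length / 2]?.getD 0) hp (by simp)
    simp only [← List.countP_eq_length_filter]
    first
      | rw [pvCountLt, List.countP_eq_length_filter]; exact hfl
      | rw [pvCountGt, List.countP_eq_length_filter]; exact hfg

def solve_alt (A : List Int) (B : Int) : Int :=
  let n : Int := A.length
  let ts := A.sum
  let xs := sumSmallest A B
  let ns := ts - sumSmallest A (n - B)
  max |2 * ns - ts| |2 * xs - ts|

-- ===== PRECONDITION & SPEC =====
-- A raises IndexError (the first loop reads A[i] for i up to B-1) exactly when B > len(A); that is the only raise.
def Pre_solve (A : List Int) (B : Int) : Prop := B ≤ (A.length : Int)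
instance (A : List Int) (B : Int) : Decidable (Pre_solve A B) := by unfold Pre_solve; infer_instance
def pvWitness_solve : List Int × Int := ([1, 2, 3], 2)

def Spec_solve (A : List Int) (B : Int) (out : Int) : Prop := out = solve_alt A B
instance (A : List Int) (B : Int) (out : Int) : Decidable (Spec_solve A B out) := by unfold Spec_solve; infer_instance

-- ===== CLAIM (what is proved, stated in full; the proofs are below) =====
def Claim_equal_solve : Prop := ∀ (A : List Int) (B : Int), Dom_solve A B → Pre_solve A B → Spec_solve A B (solve A B)

-- ===== LEMMAS AND PROOFS =====

-- sorted xs decomposes around any pivot p into (sorted of the <p part) ++ (count p copies of p) ++ (sorted of the >p part)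
theorem sorted_decomp (xs : List Int) (p : Int) :
    (PySem.List.sorted xs (fun x => x) false)
      = (PySem.List.sorted (xs.filter (fun x => x < p)) (fun x => x) false)
        ++ List.replicate (xs.count p) p
        ++ (PySem.List.sorted (xs.filter (fun x => p < x)) (fun x => x) false) := by
  have hf1 : (fun x : Int => (x == p) && !decide (x < p)) = (fun x : Int => x == p) := by
    funext x; by_cases h : x = p <;> simp [h]
  have hf2 : (fun x : Int => !(x == p) && !decide (x < p)) = (fun x : Int => decide (p < x)) := by
    funext x
    rcases lt_trichotomy x p with h | h | h
    · have h2 : ¬ p < x := by omega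
      simp [h, h2]
    · subst h; simp
    · have h1 : ¬ x < p := by omega
      have h2 : x ≠ p := by omega
      simp [h, h1, h2]
  have hE : (xs.filter (fun x => !decide (x < p))).filter (fun x => x == p)
      = List.replicate (xs.count p) p := by
    rw [List.filter_filter, hf1, List.filter_beq]
  have hG : (xs.filter (fun x => !decide (x < p))).filter (fun x => !(x == p))
      = xs.filter (fun x => decide (p < x)) := by
    rw [List.filter_filter, hf2]
  apply PySem.List.sorted_id_eq_of_perm_of_pairwise
  · -- permutation
    refine List.Perm.trans ?_ (List.filter_append_perm (fun x => decide (x < p)) xs)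
    rw [List.append_assoc]
    refine List.Perm.append (PySem.List.sorted_perm _ _ _) ?_
    refine List.Perm.trans
      (List.Perm.append (List.Perm.refl _) (PySem.List.sorted_perm _ _ _)) ?_
    rw [← hE, ← hG]
    exact List.filter_append_perm _ _
  · -- pairwise ≤
    rw [List.append_assoc, List.pairwise_append]
    refine ⟨by simpa using PySem.List.sorted_pairwise _ (fun x : Int => x), ?_, ?_⟩
    · rw [List.pairwise_append]
      refine ⟨List.pairwise_replicate.mpr (Or.inr le_rfl),
        by simpa using PySem.List.sorted_pairwise _ (fun x : Int => x), ?_⟩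
      intro a ha b hb
      have hap : a = p := List.eq_of_mem_replicate ha
      have hbp : p < b := by
        have := (PySem.List.sorted_perm _ (fun x : Int => x) false).mem_iff.mp hb
        simpa using (List.of_mem_filter this)
      omega
    · intro a ha b hb
      have hap : a < p := by
        have := (PySem.List.sorted_perm _ (fun x : Int => x) false).mem_iff.mp ha
        simpa using (List.of_mem_filter this)
      rcases List.mem_append.mp hb with hb | hb
      · have : b = p := List.eq_of_mem_replicate hb
        omega
      · have hbp : p < b := by
          have := (PySem.List.sorted_perm _ (fun x : Int => x) false).mem_iff.mp hb
          simpa using (List.of_mem_filter this)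
        omega

-- the partition recursion computes the sum of the first k (clamped) elements of the sorted list
theorem sumSmallest_eq (xs : List Int) (k : Int) :
    sumSmallest xs k = ((PySem.List.sorted xs (fun x => x) false).take k.toNat).sum := by
  generalize hN : xs.length = N
  induction N using Nat.strong_induction_on generalizing xs k with
  | _ N IH =>
  rw [sumSmallest.eq_def]
  split_ifs with h1 h2
  · rcases h1 with h | h
    · simp [Int.toNat_of_nonpos h]
    · simp [h, PySem.List.sorted]
  · have hk : xs.length ≤ k.toNat := by omega
    rw [List.take_of_length_le (by simpa using hk)]
    exact ((PySem.List.sorted_perm xs (fun x => x) false).sum_eq).symm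
  · show (let p := xs.getD (xs.length / 2) 0;
      let less := xs.filter (fun x => x < p);
      if k ≤ (less.length : Int) then sumSmallest less k
      else
        let eq : Int := xs.count p
        if k ≤ (less.length : Int) + eq then less.sum + (k - less.length) * p
        else
          let gtr := xs.filter (fun x => p < x)
          less.sum + eq * p + sumSmallest gtr (k - less.length - eq)) = _
    simp only []
    have hxne : xs ≠ [] := by tauto
    have hk0 : 0 < k := by omega
    have hplen : xs.length ≠ 0 := fun h0 => hxne (List.length_eq_zero_iff.mp h0)
    have hidx : xs.length / 2 < xs.length := Nat.div_lt_self (Nat.pos_of_ne_zero hplen) (by omega)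
    generalize hpv : xs.getD (xs.length / 2) 0 = p
    have hpmem : p ∈ xs := by
      rw [← hpv, List.getD_eq_getElem xs 0 hidx]; exact List.getElem_mem hidx
    have hdec := sorted_decomp xs p
    have hll : (xs.filter (fun x => x < p)).length < xs.length := pvFilterLt _ p hpmem (by simp)
    have hgl : (xs.filter (fun x => p < x)).length < xs.length := pvFilterLt _ p hpmem (by simp)
    have hIHl := IH (xs.filter (fun x => x < p)).length (by omega) (xs.filter (fun x => x < p)) k rfl
    have hIHg := IH (xs.filter (fun x => p < x)).length (by omega) (xs.filter (fun x => p < x))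
      (k - ((xs.filter (fun x => x < p)).length : Int) - (xs.count p : Int)) rfl
    have hLlen : (PySem.List.sorted (xs.filter (fun x => x < p)) (fun x => x) false).length
        = (xs.filter (fun x => x < p)).length := (PySem.List.sorted_perm _ _ _).length_eq
    have hLsum : (PySem.List.sorted (xs.filter (fun x => x < p)) (fun x => x) false).sum
        = (xs.filter (fun x => x < p)).sum := (PySem.List.sorted_perm _ _ _).sum_eq
    obtain ⟨ls, hls⟩ : ∃ ls, xs.filter (fun x => x < p) = ls := ⟨_, rfl⟩
    obtain ⟨gs, hgs⟩ : ∃ gs, xs.filter (fun x => p < x) = gs := ⟨_, rfl⟩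
    obtain ⟨c, hc⟩ : ∃ c, xs.count p = c := ⟨_, rfl⟩
    obtain ⟨L, hL⟩ : ∃ L, PySem.List.sorted ls (fun x => x) false = L := ⟨_, rfl⟩
    obtain ⟨G, hG⟩ : ∃ G, PySem.List.sorted gs (fun x => x) false = G := ⟨_, rfl⟩
    simp only [hls, hgs, hc, hL, hG] at *
    rw [hdec, List.append_assoc]
    split_ifs with h3 h4
    · rw [hIHl, List.take_append_of_le_length (by omega)]
    · rw [List.take_append, List.take_append,
        List.take_of_length_le (l := L) (i := k.toNat) (by omega),
        List.take_replicate, List.sum_append, List.sum_append, hLsum,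
        show k.toNat - L.length - (List.replicate c p).length = 0 by
          simp only [List.length_replicate]; omega,
        List.take_zero, List.sum_nil, List.sum_replicate,
        show min (k.toNat - L.length) c = k.toNat - ls.length by
          simp only [hLlen]; omega,
        nsmul_eq_mul,
        show ((k.toNat - ls.length : Nat) : Int) = k - ls.length by omega, add_zero]
    · rw [List.take_append, List.take_append,
        List.take_of_length_le (l := L) (i := k.toNat) (by omega),
        List.take_of_length_le (l := List.replicate c p) (i := k.toNat - L.length)
          (by simp only [List.length_replicate]; omega),
        List.sum_append, List.sum_append, hLsum, List.sum_replicate, nsmul_eq_mul,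
        show k.toNat - L.length - (List.replicate c p).length
            = (k - ((ls.length : Nat) : Int) - ((c : Nat) : Int)).toNat by
          simp only [List.length_replicate, hLlen]; omega,
        hIHg]
      ring

-- A's first loop: sum of a prefix of the sorted list
theorem prefix_sum (s : List Int) (m : Nat) (hm : m ≤ s.length) :
    (PySem.List.pyRange 0 (m : Int) 1).foldl (fun acc i => acc + PySem.List.pyGetD s i 0) 0
      = (s.take m).sum := by
  induction m with
  | zero => simp [PySem.List.pyRange_one_eq_nil (le_refl 0)]
  | succ m ih =>
    have hm' : m ≤ s.length := Nat.le_of_succ_le hm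
    have hcast : ((m + 1 : Nat) : Int) = (m : Int) + 1 := by push_cast; ring
    rw [hcast, PySem.List.pyRange_one_succ_right (by positivity), List.foldl_append, ih hm']
    have hlt : m < s.length := hm
    simp only [List.foldl_cons, List.foldl_nil, PySem.List.pyGetD_natCast, List.getD_eq_getElem s 0 hlt, List.sum_take_succ s m hlt]

-- A's third loop: sum of a suffix of the sorted list
theorem suffix_sum (s : List Int) (m : Nat) (hm : m ≤ s.length) :
    (PySem.List.pyRange ((s.length : Int) - 1) ((s.length : Int) - (m : Int) - 1) (-1)).foldl
        (fun acc k => acc + PySem.List.pyGetD s k 0) 0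
      = (s.drop (s.length - m)).sum := by
  rw [PySem.List.pyRange_neg_one_eq_reverse]
  have h1 : (s.length : Int) - (m : Int) - 1 + 1 = (s.length : Int) - (m : Int) := by ring
  have h2 : (s.length : Int) - 1 + 1 = (s.length : Int) := by ring
  rw [h1, h2, PySem.List.foldl_add, List.map_reverse, List.sum_reverse]
  have h3 : ((s.length : Int) - (m : Int)).toNat = s.length - m := by omega
  have h4 := PySem.List.map_pyGetD_pyRange s 0 (a := (s.length : Int) - (m : Int)) (by omega)
  simp only [PySem.List.len] at h4
  rw [h4, h3]
  simp

-- ===== VERDICT (by name: the statement is the Claim_ definition above) =====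
theorem solve_spec : Claim_equal_solve := by
  intro A B _ hpre
  show solve A B = solve_alt A B
  simp only [solve, solve_alt]
  rw [sumSmallest_eq, sumSmallest_eq]
  obtain ⟨s, hs⟩ : ∃ s, PySem.List.sorted A (fun x => x) false = s := ⟨_, rfl⟩
  rw [hs]
  have hslen : s.length = A.length := by
    rw [← hs]; exact (PySem.List.sorted_perm _ _ _).length_eq
  have hssum : s.sum = A.sum := by
    rw [← hs]; exact (PySem.List.sorted_perm _ _ _).sum_eq
  have hpreA : B ≤ (A.length : Int) := hpre
  have hts : (PySem.List.pyRange 0 (s.length : Int) 1).foldl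
      (fun acc j => acc + PySem.List.pyGetD s j 0) 0 = A.sum := by
    have h := prefix_sum s s.length le_rfl
    rwa [List.take_length, hssum] at h
  have hxs : (PySem.List.pyRange 0 B 1).foldl
      (fun acc i => acc + PySem.List.pyGetD s i 0) 0 = (s.take B.toNat).sum := by
    by_cases hB : B ≤ 0
    · rw [PySem.List.pyRange_one_eq_nil hB, Int.toNat_of_nonpos hB]
      simp
    · have h := prefix_sum s B.toNat (by omega)
      rwa [Int.toNat_of_nonneg (by omega)] at h
  have hns : (PySem.List.pyRange ((s.length : Int) - 1) ((s.length : Int) - B - 1) (-1)).foldl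
      (fun acc k => acc + PySem.List.pyGetD s k 0) 0
      = A.sum - (s.take ((A.length : Int) - B).toNat).sum := by
    by_cases hB : B ≤ 0
    · rw [PySem.List.pyRange_neg_one_eq_nil (by omega),
        List.take_of_length_le (by omega), hssum]
      simp
    · have h := suffix_sum s B.toNat (by omega)
      rw [show ((B.toNat : Nat) : Int) = B by omega] at h
      rw [h]
      have hdt : ((A.length : Int) - B).toNat = s.length - B.toNat := by omega
      rw [hdt, ← hssum, ← List.sum_take_add_sum_drop s (s.length - B.toNat)]
      ring
  rw [hts, hxs, hns]
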